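-- pv_equiv track=rewrite | github.com/Jirka-Mayer/BachelorThesis | mashcima/primus_adapter.py | mashcima_annotation_has_valid_beams
-- ===== SOURCE A (Python) =====
-- from typing import Tuple, Generator
--
-- def mashcima_annotation_has_valid_beams(annotation: str) -> Tuple[bool, str]:
--     tokens = annotation.split()
--     in_beam = False
--     for t in tokens:
--
--         # skip non-note tokens
--         if ("e" not in t) and ("s" not in t) and ("t" not in t):
--             continue
--
--         # skip rests -> those are ok
--         if t == "er" or t == "sr" or t == "tr":
--             continue
--
--         g = t.rstrip("-0123456789")
--         s = g.startswith("=")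
--         e = g.endswith("=")
--
--         if in_beam:
--             if not s:
--                 return False, "Non-finished beam: 'x= x' at: " + t
--         else:
--             if s:
--                 return False, "Non-started beam: 'x =x' at: " + t
--
--         in_beam = e
--
--     return True, "everything ok"
-- ===== SOURCE B (Python) =====
-- from typing import Tuple
--
-- def mashcima_annotation_has_valid_beams(annotation: str) -> Tuple[bool, str]:
--     # Declarative view: a note continues a beam (starts with '=') exactly when
--     # its predecessor left one open (ends with '='); so the list of start flags
--     # must equal the list of end flags shifted right by one (False in front).
--     notes = [t for t in annotation.split()
--              if ("e" in t or "s" in t or "t" in t) and t not in ("er", "sr", "tr")]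
--     cores = [t.rstrip("-0123456789") for t in notes]
--     starts = [g.startswith("=") for g in cores]
--     shifted = ([False] + [g.endswith("=") for g in cores])[:len(notes)]
--     if starts == shifted:
--         return True, "everything ok"
--     i = next(k for k in range(len(notes)) if starts[k] != shifted[k])
--     if shifted[i]:
--         return False, "Non-finished beam: 'x= x' at: " + notes[i]
--     return False, "Non-started beam: 'x =x' at: " + notes[i]
-- ===== Notes on version B (the rewrite author's own statement) =====
-- stated objective: alternative
-- what changed: B drops A's stateful in_beam loop entirely: it builds the start-flag and end-flag sequences of the note tokens, checks validity as a whole-list equality between the start flags and the end flags shifted right by one position, and only on failure locates the first mismatching index to pick the error message.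
import Mathlib
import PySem

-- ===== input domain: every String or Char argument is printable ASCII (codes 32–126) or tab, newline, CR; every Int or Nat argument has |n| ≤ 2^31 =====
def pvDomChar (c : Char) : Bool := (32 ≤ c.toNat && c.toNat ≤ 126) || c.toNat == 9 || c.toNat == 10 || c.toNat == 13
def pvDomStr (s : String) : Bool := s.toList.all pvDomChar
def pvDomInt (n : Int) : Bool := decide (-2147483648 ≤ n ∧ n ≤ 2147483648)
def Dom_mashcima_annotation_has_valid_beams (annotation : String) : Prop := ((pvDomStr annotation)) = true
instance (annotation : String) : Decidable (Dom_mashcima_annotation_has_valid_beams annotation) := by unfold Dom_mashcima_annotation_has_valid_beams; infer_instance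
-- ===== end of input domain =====

-- B replaces A's stateful in_beam scan by a declarative shift-and-compare: the start flags of
-- the note tokens must equal the end flags shifted right by one (objective: alternative).

-- ===== PORT A =====
-- hand port of t.rstrip("-0123456789"): drop trailing characters of that set (exact)
def pvRstripNum (cs : List Char) : List Char :=
  (cs.reverse.dropWhile
    (fun c => c ∈ ['-','0','1','2','3','4','5','6','7','8','9'])).reverse

def pvLoopA : List String → Bool → Bool × String
  | [], _ => (true, "everything ok")
  | t :: ts, inBeam =>
    if !(PySem.Str.isIn "e" t) && !(PySem.Str.isIn "s" t) && !(PySem.Str.isIn "t" t) then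
      pvLoopA ts inBeam
    else if t == "er" || t == "sr" || t == "tr" then
      pvLoopA ts inBeam
    else
      let g := String.ofList (pvRstripNum t.toList)
      let s := PySem.Str.startswith g "="
      let e := PySem.Str.endswith g "="
      if inBeam then
        if !s then (false, "Non-finished beam: 'x= x' at: " ++ t)
        else pvLoopA ts e
      else
        if s then (false, "Non-started beam: 'x =x' at: " ++ t)
        else pvLoopA ts e

def mashcima_annotation_has_valid_beams (annotation : String) : Bool × String :=
  pvLoopA (PySem.Str.split₀ annotation) false

-- ===== PORT B =====
def pvNotePred (t : String) : Bool :=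
  (PySem.Str.isIn "e" t || PySem.Str.isIn "s" t || PySem.Str.isIn "t" t)
    && !(t == "er" || t == "sr" || t == "tr")

def pvCore (t : String) : String := String.ofList (pvRstripNum t.toList)

-- next(k for k in range(...) if starts[k] != shifted[k]): first index where the lists differ
def pvFirstMismatch : List Bool → List Bool → Nat
  | a :: as, b :: bs => if a ≠ b then 0 else pvFirstMismatch as bs + 1
  | _, _ => 0

def mashcima_annotation_has_valid_beams_alt (annotation : String) : Bool × String :=
  let notes := (PySem.Str.split₀ annotation).filter pvNotePred
  let starts := notes.map (fun t => PySem.Str.startswith (pvCore t) "=")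
  let shifted := (false :: notes.map (fun t => PySem.Str.endswith (pvCore t) "=")).take notes.length
  if starts = shifted then (true, "everything ok")
  else
    let i := pvFirstMismatch starts shifted
    -- notes[i] / shifted[i]: i < notes.length whenever the lists differ, so getD is exact
    if shifted.getD i false then (false, "Non-finished beam: 'x= x' at: " ++ notes.getD i "")
    else (false, "Non-started beam: 'x =x' at: " ++ notes.getD i "")

-- ===== PRECONDITION & SPEC =====
def Spec_mashcima_annotation_has_valid_beams (annotation : String) (out : Bool × String) : Prop := out = mashcima_annotation_has_valid_beams_alt annotation
instance (annotation : String) (out : Bool × String) : Decidable (Spec_mashcima_annotation_has_valid_beams annotation out) := by unfold Spec_mashcima_annotation_has_valid_beams; infer_instance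

-- ===== CLAIM (what is proved, stated in full; the proofs are below) =====
def Claim_equal_mashcima_annotation_has_valid_beams : Prop := ∀ (annotation : String), Dom_mashcima_annotation_has_valid_beams annotation → Spec_mashcima_annotation_has_valid_beams annotation (mashcima_annotation_has_valid_beams annotation)

-- ===== LEMMAS AND PROOFS =====
-- proof-side restatement of A's loop over the already-filtered note tokens
def pvNoteLoop : List String → Bool → Bool × String
  | [], _ => (true, "everything ok")
  | t :: ts, inBeam =>
    let s := PySem.Str.startswith (pvCore t) "="
    let e := PySem.Str.endswith (pvCore t) "="
    if inBeam then
      if !s then (false, "Non-finished beam: 'x= x' at: " ++ t)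
      else pvNoteLoop ts e
    else
      if s then (false, "Non-started beam: 'x =x' at: " ++ t)
      else pvNoteLoop ts e

-- proof-side name for B's shift-and-compare body, with the leading shifted flag as a parameter
def pvShiftCheck (notes : List String) (b : Bool) : Bool × String :=
  let starts := notes.map (fun t => PySem.Str.startswith (pvCore t) "=")
  let shifted := (b :: notes.map (fun t => PySem.Str.endswith (pvCore t) "=")).take notes.length
  if starts = shifted then (true, "everything ok")
  else
    let i := pvFirstMismatch starts shifted
    if shifted.getD i false then (false, "Non-finished beam: 'x= x' at: " ++ notes.getD i "")
    else (false, "Non-started beam: 'x =x' at: " ++ notes.getD i "")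

theorem pvLoopA_eq_noteLoop (ts : List String) (b : Bool) :
    pvLoopA ts b = pvNoteLoop (ts.filter pvNotePred) b := by
  induction ts generalizing b with
  | nil => rfl
  | cons t ts ih =>
    simp only [pvLoopA, List.filter]
    by_cases he : PySem.Str.isIn "e" t <;>
      by_cases hs : PySem.Str.isIn "s" t <;>
        by_cases ht : PySem.Str.isIn "t" t <;>
          by_cases hr : (t == "er" || t == "sr" || t == "tr") = true <;>
            simp only [pvNotePred, he, hs, ht, hr, Bool.not_true, Bool.not_false, Bool.and_false,
              Bool.and_true, Bool.or_true, Bool.or_false, Bool.not_eq_true', if_true, ih,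
              pvNoteLoop, pvCore] <;>
            cases b <;> simp

-- pushing B's check one note forward when the leading shifted flag equals the head's start flag
theorem pvShiftCheck_cons_eq (t : String) (ts : List String) :
    pvShiftCheck (t :: ts) (PySem.Str.startswith (pvCore t) "=") =
      pvShiftCheck ts (PySem.Str.endswith (pvCore t) "=") := by
  unfold pvShiftCheck
  simp only [List.map_cons, List.length_cons, List.take_succ_cons]
  by_cases htail : ts.map (fun t => PySem.Str.startswith (pvCore t) "=")
      = (PySem.Str.endswith (pvCore t) "=" ::
          ts.map (fun t => PySem.Str.endswith (pvCore t) "=")).take ts.length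
  · rw [if_pos (by rw [htail]), if_pos htail]
  · rw [if_neg (by simpa using htail), if_neg htail,
      show pvFirstMismatch
          (PySem.Str.startswith (pvCore t) "=" ::
            ts.map (fun t => PySem.Str.startswith (pvCore t) "="))
          (PySem.Str.startswith (pvCore t) "=" ::
            (PySem.Str.endswith (pvCore t) "=" ::
              ts.map (fun t => PySem.Str.endswith (pvCore t) "=")).take ts.length)
        = pvFirstMismatch (ts.map (fun t => PySem.Str.startswith (pvCore t) "="))
            ((PySem.Str.endswith (pvCore t) "=" ::
              ts.map (fun t => PySem.Str.endswith (pvCore t) "=")).take ts.length) + 1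
        from by simp [pvFirstMismatch]]
    simp only [List.getD_cons_succ]

theorem pvShiftCheck_eq_noteLoop (notes : List String) (b : Bool) :
    pvShiftCheck notes b = pvNoteLoop notes b := by
  induction notes generalizing b with
  | nil => rfl
  | cons t ts ih =>
    by_cases hsb : PySem.Str.startswith (pvCore t) "=" = b
    · subst hsb
      rw [pvShiftCheck_cons_eq, ih, pvNoteLoop]
      cases hss : PySem.Str.startswith (pvCore t) "=" <;> simp
    · rw [pvNoteLoop]
      unfold pvShiftCheck
      simp only [List.map_cons, List.length_cons, List.take_succ_cons]
      clear ih
      cases b <;> cases hss : PySem.Str.startswith (pvCore t) "=" <;>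
        simp_all [pvFirstMismatch]

-- ===== VERDICT (by name: the statement is the Claim_ definition above) =====
theorem mashcima_annotation_has_valid_beams_spec : Claim_equal_mashcima_annotation_has_valid_beams := by
  intro a _
  unfold Spec_mashcima_annotation_has_valid_beams mashcima_annotation_has_valid_beams
    mashcima_annotation_has_valid_beams_alt
  rw [pvLoopA_eq_noteLoop]
  exact (pvShiftCheck_eq_noteLoop ((PySem.Str.split₀ a).filter pvNotePred) false).symm
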